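-- pv_equiv track=rewrite | github.com/sacdallago/biotrainer | examples/h5file_enhancement/nucleotide_augmentation/nt_augment.py | aa_to_nt
-- ===== SOURCE A (Python) =====
-- import itertools
-- from typing import Tuple, Dict, List
--
-- _nt_aa_dict = {
--     'A': ['GCT', 'GCC', 'GCA', 'GCG'],
--     'R': ['CGT', 'CGC', 'CGA', 'CGG', 'AGA', 'AGG'],
--     'N': ['AAT', 'AAC'],
--     'D': ['GAT', 'GAC'],
--     'C': ['TGT', 'TGC'],
--     'Q': ['CAA', 'CAG'],
--     'E': ['GAA', 'GAG'],
--     'G': ['GGT', 'GGC', 'GGA', 'GGG'],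
--     'H': ['CAT', 'CAC'],
--     'I': ['ATT', 'ATC', 'ATA'],
--     'L': ['CTT', 'CTC', 'CTA', 'CTG', 'TTA', 'TTG'],
--     'K': ['AAA', 'AAG'],
--     'M': ['ATG'],
--     'F': ['TTT', 'TTC'],
--     'P': ['CCT', 'CCC', 'CCA', 'CCG'],
--     'S': ['TCT', 'TCC', 'TCA', 'TCG', 'AGT', 'AGC'],
--     'T': ['ACT', 'ACC', 'ACA', 'ACG'],
--     'W': ['TGG'],
--     'Y': ['TAT', 'TAC'],
--     'V': ['GTT', 'GTC', 'GTA', 'GTG'],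
--     '*': ['TAA', 'TGA', 'TAG'],
--     'X': ['XXX']  # For masked input values
-- }
--
-- def aa_to_nt(seqs_and_targets_dict: dict, aug_factor: int) -> Tuple[Dict, Dict]:
--     """
--     Function which produces aug_factor unique nucleotide sequences for each amino acid sequence in
--     seq_list. The appropriate targets (labels) are maintained for the augmented sequences.
--
--     @author: Mason Minot
--     @editor: Sebastian Franz
--     Adapted to the needs of biotrainer. Input is replaced by one dictionary with seq_id -> (sequence, target).
--     Thereby, results are directly stored by original sequence id, making things easier
--     in the notebook.
--
--     Parameters
--     ----------
--     seqs_and_targets_dict: dict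
--         seq_id: str -> (sequence: str, target: str)
--
--     aug_factor : int
--         the augmentation factor. the number of unique nucleotide sequences to create per protein sequence
--
--     Returns
--     -------
--     seq_dict : dict
--         seq_id -> List with nucleotide sequences (length of list == aug_factor)
--     target_dict:
--         seq_id -> List of targets (length of list == aug_factor, not necessary for the notebook)
--     """
--
--     seq_by_id = {idx: str(sequence) for idx, (sequence, target) in seqs_and_targets_dict.items()}
--     target_by_id = {idx: target for idx, (sequence, target) in seqs_and_targets_dict.items()}
--
--     seq_dict = {}
--     target_dict = {}
--     for key in seqs_and_targets_dict.keys():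
--         seq_dict[key] = []
--         nt_codons_per_residue = {}
--         for i in range(len(seq_by_id[key])):
--             # determine possible nt codons per aa position
--             nt_codons_per_residue[str(i)] = _nt_aa_dict[seq_by_id[key][i]]
--
--         # use itertools product function to create a list of all possible combinations of nt codons  for given aa seq
--         nucleotides = list(itertools.islice(itertools.product(*nt_codons_per_residue.values()), aug_factor))
--         # convert list of tuples to list of strings
--         nucleotides = list(map(''.join, nucleotides))
--         tmp_target_list = []
--         for j in range(len(nucleotides)):
--             tmp_target_list.append(target_by_id[key])
--         seq_dict[key] = nucleotides
--         target_dict[key] = tmp_target_list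
--
--     return seq_dict, target_dict
-- ===== SOURCE B (Python) =====
-- from typing import Tuple, Dict, List
--
-- _nt_aa_dict = {
--     'A': ['GCT', 'GCC', 'GCA', 'GCG'],
--     'R': ['CGT', 'CGC', 'CGA', 'CGG', 'AGA', 'AGG'],
--     'N': ['AAT', 'AAC'],
--     'D': ['GAT', 'GAC'],
--     'C': ['TGT', 'TGC'],
--     'Q': ['CAA', 'CAG'],
--     'E': ['GAA', 'GAG'],
--     'G': ['GGT', 'GGC', 'GGA', 'GGG'],
--     'H': ['CAT', 'CAC'],
--     'I': ['ATT', 'ATC', 'ATA'],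
--     'L': ['CTT', 'CTC', 'CTA', 'CTG', 'TTA', 'TTG'],
--     'K': ['AAA', 'AAG'],
--     'M': ['ATG'],
--     'F': ['TTT', 'TTC'],
--     'P': ['CCT', 'CCC', 'CCA', 'CCG'],
--     'S': ['TCT', 'TCC', 'TCA', 'TCG', 'AGT', 'AGC'],
--     'T': ['ACT', 'ACC', 'ACA', 'ACG'],
--     'W': ['TGG'],
--     'Y': ['TAT', 'TAC'],
--     'V': ['GTT', 'GTC', 'GTA', 'GTG'],
--     '*': ['TAA', 'TGA', 'TAG'],
--     'X': ['XXX']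
-- }
--
--
-- def _nth_combination(codon_lists, n):
--     # Decode n as a mixed-radix number, last residue least significant
--     # (the ordering of itertools.product).
--     parts = []
--     for codons in reversed(codon_lists):
--         n, r = divmod(n, len(codons))
--         parts.append(codons[r])
--     parts.reverse()
--     return ''.join(parts)
--
--
-- def aa_to_nt(seqs_and_targets_dict: dict, aug_factor: int) -> Tuple[Dict, Dict]:
--     seq_dict = {}
--     target_dict = {}
--     for key, (sequence, target) in seqs_and_targets_dict.items():
--         codon_lists = [_nt_aa_dict[c] for c in str(sequence)]
--         total = 1
--         for codons in codon_lists: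
--             total *= len(codons)
--         nucleotides = [_nth_combination(codon_lists, n)
--                        for n in range(min(aug_factor, total))]
--         seq_dict[key] = nucleotides
--         target_dict[key] = [target] * len(nucleotides)
--     return seq_dict, target_dict
-- ===== Notes on version B (the rewrite author's own statement) =====
-- stated objective: alternative
-- what changed: B computes each augmented sequence directly by decoding its index as a mixed-radix number over the per-residue codon-list lengths (capped at min(aug_factor, total)), instead of materialising itertools.product and slicing it.
import Mathlib
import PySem

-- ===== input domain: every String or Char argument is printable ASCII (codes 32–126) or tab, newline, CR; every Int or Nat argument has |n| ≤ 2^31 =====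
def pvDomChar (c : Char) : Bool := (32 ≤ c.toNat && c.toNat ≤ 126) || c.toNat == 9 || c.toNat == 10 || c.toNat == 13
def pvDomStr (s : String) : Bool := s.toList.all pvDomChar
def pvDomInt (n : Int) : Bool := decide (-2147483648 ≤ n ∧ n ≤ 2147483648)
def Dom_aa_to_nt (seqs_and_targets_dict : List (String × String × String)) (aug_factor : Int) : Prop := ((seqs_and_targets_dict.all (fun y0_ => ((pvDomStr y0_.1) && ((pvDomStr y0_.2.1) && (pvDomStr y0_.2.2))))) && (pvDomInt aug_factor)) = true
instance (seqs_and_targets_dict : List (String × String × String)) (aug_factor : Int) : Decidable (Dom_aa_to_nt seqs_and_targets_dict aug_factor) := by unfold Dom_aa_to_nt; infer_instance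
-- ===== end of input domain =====

-- B replaces A's itertools.product + islice enumeration by direct mixed-radix decoding of each
-- combination index (alternative decomposition, similar cost); same return value on Pre_.

-- the module constant _nt_aa_dict (shared context of both implementations): a dict literal
-- with 22 distinct keys, i.e. the Dict holding exactly these pairs in this order
def ntAaDict : PySem.Dict Char (List String) := PySem.Dict.mk
  [('A', ["GCT", "GCC", "GCA", "GCG"]),
   ('R', ["CGT", "CGC", "CGA", "CGG", "AGA", "AGG"]),
   ('N', ["AAT", "AAC"]),
   ('D', ["GAT", "GAC"]),
   ('C', ["TGT", "TGC"]),
   ('Q', ["CAA", "CAG"]),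
   ('E', ["GAA", "GAG"]),
   ('G', ["GGT", "GGC", "GGA", "GGG"]),
   ('H', ["CAT", "CAC"]),
   ('I', ["ATT", "ATC", "ATA"]),
   ('L', ["CTT", "CTC", "CTA", "CTG", "TTA", "TTG"]),
   ('K', ["AAA", "AAG"]),
   ('M', ["ATG"]),
   ('F', ["TTT", "TTC"]),
   ('P', ["CCT", "CCC", "CCA", "CCG"]),
   ('S', ["TCT", "TCC", "TCA", "TCG", "AGT", "AGC"]),
   ('T', ["ACT", "ACC", "ACA", "ACG"]),
   ('W', ["TGG"]),
   ('Y', ["TAT", "TAC"]),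
   ('V', ["GTT", "GTC", "GTA", "GTG"]),
   ('*', ["TAA", "TGA", "TAG"]),
   ('X', ["XXX"])]

-- ===== PORT A =====

-- itertools.product(*lists), materialised in product order (rightmost factor varies fastest)
def cartProd : List (List String) → List (List String)
  | [] => [[]]
  | l :: ls => l.flatMap (fun x => (cartProd ls).map (fun t => x :: t))

def aa_to_nt (seqs_and_targets_dict : List (String × String × String)) (aug_factor : Int) : (List (String × List String)) × (List (String × List String)) :=
  -- the dict parameter (assoc list in insertion order, duplicates overwrite in place)
  let d : PySem.Dict String (String × String) := PySem.Dict.ofList seqs_and_targets_dict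
  -- the seq_by_id / target_by_id dict comprehensions (str(sequence) is the identity on str)
  let seq_by_id : PySem.Dict String String := PySem.Dict.ofList (d.items.map (fun p => (p.1, p.2.1)))
  let target_by_id : PySem.Dict String String := PySem.Dict.ofList (d.items.map (fun p => (p.1, p.2.2)))
  let res := d.keys.foldl (fun (st : PySem.Dict String (List String) × PySem.Dict String (List String)) key =>
    let s := (seq_by_id.getD key "").toList
    -- nt_codons_per_residue: a dict keyed by the distinct strings str(0),…,str(len-1); its
    -- .values() in insertion order is exactly this list of codon lists (s.getD i ' ' is s[i],
    -- always in range for i ∈ range(len(s)); a missing table key is Python's KeyError, outside Pre_)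
    let codonLists := (List.range s.length).map (fun i => ntAaDict.getD (s.getD i ' ') [])
    -- list(islice(product(...), aug_factor)), then list(map(''.join, ...)); aug_factor ≥ 0 on Pre_
    let nucleotides := ((cartProd codonLists).take aug_factor.toNat).map (fun t => PySem.Str.join "" t)
    -- the append loop building tmp_target_list
    let tmp_target_list := (List.range nucleotides.length).foldl (fun acc _ => acc ++ [target_by_id.getD key ""]) []
    (st.1.insert key nucleotides, st.2.insert key tmp_target_list))
    (PySem.Dict.empty, PySem.Dict.empty)
  (res.1.items, res.2.items)

-- ===== PORT B =====

-- _nth_combination: decode n in mixed radix, last codon list least significant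
def nthCombination (codon_lists : List (List String)) (n : Int) : String :=
  let st := codon_lists.reverse.foldl
    (fun (st : Int × List String) codons =>
      (PySem.Int.floordiv st.1 (codons.length : Int),
       st.2 ++ [PySem.List.pyGetD codons (PySem.Int.mod st.1 (codons.length : Int)) ""]))
    (n, [])
  PySem.Str.join "" st.2.reverse

def aa_to_nt_alt (seqs_and_targets_dict : List (String × String × String)) (aug_factor : Int) : (List (String × List String)) × (List (String × List String)) :=
  let d : PySem.Dict String (String × String) := PySem.Dict.ofList seqs_and_targets_dict
  let res := d.items.foldl (fun (st : PySem.Dict String (List String) × PySem.Dict String (List String)) p =>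
    let codon_lists := p.2.1.toList.map (fun c => ntAaDict.getD c [])
    let total := codon_lists.foldl (fun t codons => t * (codons.length : Int)) 1
    let nucleotides := (PySem.List.pyRange 0 (min aug_factor total) 1).map (fun n => nthCombination codon_lists n)
    (st.1.insert p.1 nucleotides, st.2.insert p.1 (List.replicate nucleotides.length p.2.2)))
    (PySem.Dict.empty, PySem.Dict.empty)
  (res.1.items, res.2.items)

-- ===== PRECONDITION & SPEC =====

def validAA : List Char := ['A','R','N','D','C','Q','E','G','H','I','L','K','M','F','P','S','T','W','Y','V','*','X']

-- Pre_ excludes exactly the inputs where the Python A raises: a residue of an effective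
-- (post-overwrite) sequence that is not a key of _nt_aa_dict (KeyError), and a negative
-- aug_factor together with a nonempty dict (itertools.islice raises ValueError).
def Pre_aa_to_nt (seqs_and_targets_dict : List (String × String × String)) (aug_factor : Int) : Prop :=
  (seqs_and_targets_dict = [] ∨ 0 ≤ aug_factor) ∧
  ((PySem.Dict.ofList seqs_and_targets_dict).items.all
    (fun p => p.2.1.toList.all (fun c => validAA.contains c)) = true)

instance (seqs_and_targets_dict : List (String × String × String)) (aug_factor : Int) : Decidable (Pre_aa_to_nt seqs_and_targets_dict aug_factor) := by unfold Pre_aa_to_nt; infer_instance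

def pvWitness_aa_to_nt : (List (String × String × String)) × Int := ([("a", "M", "t")], 2)

def Spec_aa_to_nt (seqs_and_targets_dict : List (String × String × String)) (aug_factor : Int) (out : (List (String × List String)) × (List (String × List String))) : Prop := out = aa_to_nt_alt seqs_and_targets_dict aug_factor
instance (seqs_and_targets_dict : List (String × String × String)) (aug_factor : Int) (out : (List (String × List String)) × (List (String × List String))) : Decidable (Spec_aa_to_nt seqs_and_targets_dict aug_factor out) := by unfold Spec_aa_to_nt; infer_instance

-- ===== CLAIM (what is proved, stated in full; the proofs are below) =====
def Claim_equal_aa_to_nt : Prop := ∀ (seqs_and_targets_dict : List (String × String × String)) (aug_factor : Int), Dom_aa_to_nt seqs_and_targets_dict aug_factor → Pre_aa_to_nt seqs_and_targets_dict aug_factor → Spec_aa_to_nt seqs_and_targets_dict aug_factor (aa_to_nt seqs_and_targets_dict aug_factor)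

-- ===== LEMMAS AND PROOFS =====

-- product of the codon-list lengths (Nat form, for the proofs)
def prodN (ls : List (List String)) : Nat := (ls.map List.length).prod

-- the k-th tuple of cartProd ls, by most-significant-first division
def tupleAt : List (List String) → Nat → List String
  | [], _ => []
  | l :: ls, k => l.getD (k / prodN ls) "" :: tupleAt ls (k % prodN ls)

theorem prodN_nil : prodN [] = 1 := rfl
theorem prodN_cons (l : List String) (ls : List (List String)) : prodN (l :: ls) = l.length * prodN ls := by
  simp [prodN]

theorem length_cartProd (ls : List (List String)) : (cartProd ls).length = prodN ls := by
  induction ls with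
  | nil => simp [cartProd, prodN]
  | cons l ls ih => simp [cartProd, prodN, List.length_flatMap, ih]

theorem getElem?_cartProd (ls : List (List String)) : ∀ (k : Nat), k < prodN ls →
    (cartProd ls)[k]? = some (tupleAt ls k) := by
  induction ls with
  | nil =>
    intro k hk
    have : k = 0 := by simpa [prodN_nil] using hk
    subst this; simp [cartProd, tupleAt]
  | cons l ls ih =>
    induction l with
    | nil => intro k hk; rw [prodN_cons] at hk; simp at hk
    | cons x l' ihl =>
      intro k hk
      have hsplit : cartProd ((x :: l') :: ls)
          = (cartProd ls).map (fun t => x :: t) ++ l'.flatMap (fun y => (cartProd ls).map (fun t => y :: t)) := by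
        simp [cartProd]
      rw [hsplit]
      by_cases hlt : k < prodN ls
      · rw [List.getElem?_append_left (by simpa [length_cartProd] using hlt)]
        simp [ih k hlt, tupleAt, Nat.div_eq_of_lt hlt, Nat.mod_eq_of_lt hlt]
      · have hT : 0 < prodN ls := by
          rcases Nat.eq_zero_or_pos (prodN ls) with h0 | h0
          · rw [prodN_cons, h0] at hk; simp at hk
          · exact h0
        have hge : prodN ls ≤ k := le_of_not_gt hlt
        have hlen : ((cartProd ls).map (fun t => x :: t)).length = prodN ls := by
          simp [length_cartProd]
        rw [List.getElem?_append_right (by omega)]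
        have hk' : k - prodN ls < prodN (l' :: ls) := by
          rw [prodN_cons] at hk ⊢
          have : (x :: l').length * prodN ls = l'.length * prodN ls + prodN ls := by
            simp [Nat.succ_mul]
          omega
        have := ihl (k - prodN ls) hk'
        rw [hlen]
        simp only [cartProd] at this
        rw [this]
        congr 1
        simp only [tupleAt]
        rw [Nat.div_eq_sub_div hT hge, Nat.mod_eq_sub_mod hge]
        simp

theorem foldrB (ls : List (List String)) (n : Nat) (p0 : List String) :
    ls.foldr (fun codons st =>
        (PySem.Int.floordiv st.1 (codons.length : Int),
         st.2 ++ [PySem.List.pyGetD codons (PySem.Int.mod st.1 (codons.length : Int)) ""]))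
      ((n : Int), p0)
    = (((n / prodN ls : Nat) : Int), p0 ++ (tupleAt ls (n % prodN ls)).reverse) := by
  induction ls with
  | nil => simp [prodN_nil, tupleAt]
  | cons l ls ih =>
    rw [List.foldr_cons, ih]
    rw [PySem.Int.floordiv_natCast, PySem.Int.mod_natCast, PySem.List.pyGetD_natCast]
    have h1 : n / prodN ls / l.length = n / prodN (l :: ls) := by
      rw [Nat.div_div_eq_div_mul, prodN_cons, mul_comm]
    have h2 : n / prodN ls % l.length = n % prodN (l :: ls) / prodN ls := by
      rw [prodN_cons, mul_comm, Nat.mod_mul_right_div_self]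
    have h3 : n % prodN (l :: ls) % prodN ls = n % prodN ls := by
      rw [prodN_cons]
      exact Nat.mod_mod_of_dvd n (dvd_mul_left _ _)
    rw [h1, h2]
    simp only [tupleAt, h3, List.reverse_cons, List.append_assoc]

theorem nthCombination_eq (ls : List (List String)) (k : Nat) :
    nthCombination ls (k : Int) = PySem.Str.join "" (tupleAt ls (k % prodN ls)) := by
  unfold nthCombination
  rw [List.foldl_reverse]
  rw [foldrB]
  simp

theorem foldl_mul_len (ls : List (List String)) : ∀ (t : Int),
    ls.foldl (fun t codons => t * (codons.length : Int)) t = t * (prodN ls : Int) := by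
  induction ls with
  | nil => intro t; simp [prodN_nil]
  | cons l ls ih => intro t; rw [List.foldl_cons, ih, prodN_cons]; push_cast; ring

-- the per-key equality: A's sliced product of joins is B's decoded range
theorem perKey (ls : List (List String)) (aug : Int) (ha : 0 ≤ aug) :
    ((cartProd ls).take aug.toNat).map (fun t => PySem.Str.join "" t)
    = (PySem.List.pyRange 0 (min aug (ls.foldl (fun t codons => t * (codons.length : Int)) 1)) 1).map
        (fun n => nthCombination ls n) := by
  rw [foldl_mul_len ls 1, one_mul]
  have hM : (min aug ((prodN ls : Int)) - 0).toNat = min aug.toNat (prodN ls) := by omega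
  have hrange : PySem.List.pyRange 0 (min aug (prodN ls : Int)) 1
      = (List.range (min aug.toNat (prodN ls))).map (fun k : Nat => (0 : Int) + (k : Int)) := by
    rw [PySem.List.pyRange_one, hM]
  rw [hrange, List.map_map]
  apply List.ext_getElem?
  intro i
  by_cases hi : i < min aug.toNat (prodN ls)
  · rw [List.getElem?_map, List.getElem?_map,
      List.getElem?_take_of_lt (by omega),
      getElem?_cartProd ls i (by omega),
      List.getElem?_range hi]
    simp only [Option.map_some, Function.comp_apply, zero_add]
    rw [nthCombination_eq, Nat.mod_eq_of_lt (show i < prodN ls by omega)]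
  · rw [List.getElem?_eq_none (by simp only [List.length_map, List.length_take, length_cartProd]; omega),
      List.getElem?_eq_none (by simp only [List.length_map, List.length_range]; omega)]

-- items of a dict built from an assoc list with distinct keys
theorem items_ofList_of_nodup {ν : Type} (l : List (String × ν))
    (h : (l.map Prod.fst).Nodup) : (PySem.Dict.ofList l).items = l := by
  have := PySem.Dict.items_foldl_insert_fresh (l := l) (k := Prod.fst) (v := Prod.snd)
    (d := PySem.Dict.empty) (fun a _ => by simp) h
  simpa [PySem.Dict.ofList] using this

-- proof-side names for the two per-key computations (definitionally the loop bodies of the ports)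
def aNucs (sq : PySem.Dict String String) (aug : Int) (key : String) : List String :=
  ((cartProd ((List.range (sq.getD key "").toList.length).map
      (fun i => ntAaDict.getD ((sq.getD key "").toList.getD i ' ') []))).take aug.toNat).map
    (fun t => PySem.Str.join "" t)

def aTmp (sq tq : PySem.Dict String String) (aug : Int) (key : String) : List String :=
  (List.range (aNucs sq aug key).length).foldl (fun acc _ => acc ++ [tq.getD key ""]) []

def bNucs (aug : Int) (p : String × String × String) : List String :=
  (PySem.List.pyRange 0 (min aug ((p.2.1.toList.map (fun c => ntAaDict.getD c [])).foldl
      (fun t codons => t * (codons.length : Int)) 1)) 1).map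
    (fun n => nthCombination (p.2.1.toList.map (fun c => ntAaDict.getD c [])) n)

def bTmp (aug : Int) (p : String × String × String) : List String :=
  List.replicate (bNucs aug p).length p.2.2

theorem range_getD_map (s : List Char) :
    (List.range s.length).map (fun i => ntAaDict.getD (s.getD i ' ') [])
    = s.map (fun c => ntAaDict.getD c []) := by
  apply List.ext_getElem
  · simp
  · intro i h1 h2
    simp only [List.length_map, List.length_range] at h1
    simp only [List.getElem_map, List.getElem_range]
    rw [List.getD_eq_getElem _ _ h1]

theorem replicate_foldl (n : Nat) (t : String) :
    (List.range n).foldl (fun acc _ => acc ++ [t]) [] = List.replicate n t := by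
  induction n with
  | zero => simp
  | succ n ih => rw [List.range_succ, List.foldl_append, ih, List.replicate_succ']; simp

-- ===== VERDICT (by name: the statement is the Claim_ definition above) =====
theorem aa_to_nt_spec : Claim_equal_aa_to_nt := by
  intro input aug hdom hpre
  rcases hpre with ⟨haug, hvalid⟩
  unfold Spec_aa_to_nt
  rcases eq_or_ne input [] with hnil | hnil
  · subst hnil; rfl
  have haug' : 0 ≤ aug := haug.resolve_left hnil
  unfold aa_to_nt aa_to_nt_alt
  set d : PySem.Dict String (String × String) := PySem.Dict.ofList input with hd
  set sq : PySem.Dict String String := PySem.Dict.ofList (d.items.map (fun p => (p.1, p.2.1))) with hsq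
  set tq : PySem.Dict String String := PySem.Dict.ofList (d.items.map (fun p => (p.1, p.2.2))) with htq
  have hnd : d.keys.Nodup := PySem.Dict.nodup_keys_ofList input
  have hndi : (d.items.map Prod.fst).Nodup := hnd
  show ((d.keys.foldl (fun st key => (st.1.insert key (aNucs sq aug key), st.2.insert key (aTmp sq tq aug key)))
          (PySem.Dict.empty, PySem.Dict.empty)).1.items,
        (d.keys.foldl (fun st key => (st.1.insert key (aNucs sq aug key), st.2.insert key (aTmp sq tq aug key)))
          (PySem.Dict.empty, PySem.Dict.empty)).2.items)
      = ((d.items.foldl (fun st p => (st.1.insert p.1 (bNucs aug p), st.2.insert p.1 (bTmp aug p)))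
          (PySem.Dict.empty, PySem.Dict.empty)).1.items,
        (d.items.foldl (fun st p => (st.1.insert p.1 (bNucs aug p), st.2.insert p.1 (bTmp aug p)))
          (PySem.Dict.empty, PySem.Dict.empty)).2.items)
  rw [PySem.List.foldl_prod_mk (f := fun st1 key => PySem.Dict.insert st1 key (aNucs sq aug key))
      (g := fun st2 key => PySem.Dict.insert st2 key (aTmp sq tq aug key)),
    PySem.List.foldl_prod_mk (f := fun st1 p => PySem.Dict.insert st1 p.1 (bNucs aug p))
      (g := fun st2 p => PySem.Dict.insert st2 p.1 (bTmp aug p))]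
  rw [PySem.Dict.items_foldl_insert_fresh d.keys (fun key => key) (fun key => aNucs sq aug key)
      PySem.Dict.empty (fun a _ => by simp) (by simpa using hnd),
    PySem.Dict.items_foldl_insert_fresh d.keys (fun key => key) (fun key => aTmp sq tq aug key)
      PySem.Dict.empty (fun a _ => by simp) (by simpa using hnd),
    PySem.Dict.items_foldl_insert_fresh d.items Prod.fst (fun p => bNucs aug p)
      PySem.Dict.empty (fun a _ => by simp) hndi,
    PySem.Dict.items_foldl_insert_fresh d.items Prod.fst (fun p => bTmp aug p)
      PySem.Dict.empty (fun a _ => by simp) hndi]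
  have hkeys : d.keys = d.items.map Prod.fst := rfl
  have hperp : ∀ p ∈ d.items, aNucs sq aug p.1 = bNucs aug p ∧ aTmp sq tq aug p.1 = bTmp aug p := by
    intro p hp
    have hsmem : (p.1, p.2.1) ∈ sq.items := by
      rw [hsq, items_ofList_of_nodup _ (by simpa [List.map_map] using hndi)]
      exact List.mem_map.mpr ⟨p, hp, rfl⟩
    have htmem : (p.1, p.2.2) ∈ tq.items := by
      rw [htq, items_ofList_of_nodup _ (by simpa [List.map_map] using hndi)]
      exact List.mem_map.mpr ⟨p, hp, rfl⟩
    have hsnd : sq.keys.Nodup := by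
      show (sq.items.map Prod.fst).Nodup
      rw [hsq, items_ofList_of_nodup _ (by simpa [List.map_map] using hndi)]
      simpa [List.map_map] using hndi
    have htnd : tq.keys.Nodup := by
      show (tq.items.map Prod.fst).Nodup
      rw [htq, items_ofList_of_nodup _ (by simpa [List.map_map] using hndi)]
      simpa [List.map_map] using hndi
    have hgs : sq.getD p.1 "" = p.2.1 := PySem.Dict.getD_of_mem_items sq hsmem hsnd ""
    have hgt : tq.getD p.1 "" = p.2.2 := PySem.Dict.getD_of_mem_items tq htmem htnd ""
    have hnucs : aNucs sq aug p.1 = bNucs aug p := by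
      unfold aNucs bNucs
      rw [hgs, range_getD_map]
      exact perKey _ aug haug'
    refine ⟨hnucs, ?_⟩
    unfold aTmp bTmp
    rw [hgt, replicate_foldl, hnucs]
  have e1 : d.items.map ((fun a => (a, aNucs sq aug a)) ∘ Prod.fst)
      = d.items.map (fun a => (a.1, bNucs aug a)) :=
    List.map_congr_left (fun p hp => by simp [Function.comp, (hperp p hp).1])
  have e2 : d.items.map ((fun a => (a, aTmp sq tq aug a)) ∘ Prod.fst)
      = d.items.map (fun a => (a.1, bTmp aug a)) :=
    List.map_congr_left (fun p hp => by simp [Function.comp, (hperp p hp).2])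
  rw [hkeys, List.map_map, List.map_map, e1, e2]
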